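-- pv_equiv track=rewrite | github.com/KernelBusy/track_modified | validator_lite.py | clones
-- ===== SOURCE A (Python) =====
-- def clones(t2p):
--     "Returns dictionary of particles that have clones (multiple track assocs)"
--     p2t = {}
--     for track, (_, particle) in iter(t2p.items()):
--         if particle is not None:
--             # for each associated track
--             if particle not in p2t:
--                 # if this is the first time we see this particle, initialize
--                 p2t[particle] = []
--             # add this track to the list of tracks associated with this particle
--             p2t[particle].append(track)
--     # if more than one track is associated with a particle, it is a clone.
--     return {p:t for p,t in iter(p2t.items()) if len(t) > 1}
-- ===== SOURCE B (Python) =====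
-- def clones(t2p):
--     "Returns dictionary of particles that have clones (multiple track assocs)"
--     # pass 1: count tracks per (non-None) particle
--     counts = {}
--     for _, (_, particle) in t2p.items():
--         if particle is not None:
--             counts[particle] = counts.get(particle, 0) + 1
--     # pass 2: collect tracks only for particles with more than one track
--     result = {}
--     for track, (_, particle) in t2p.items():
--         if particle is not None and counts[particle] > 1:
--             result.setdefault(particle, []).append(track)
--     return result
-- ===== Notes on version B (the rewrite author's own statement) =====
-- stated objective: alternative
-- what changed: A builds one particle->tracks grouping dict and then filters its items by list length; B never filters a grouping: a first pass builds a plain count table of tracks per particle, and a second pass over t2p collects, via setdefault, only the tracks whose particle's count exceeds one.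
import Mathlib
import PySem

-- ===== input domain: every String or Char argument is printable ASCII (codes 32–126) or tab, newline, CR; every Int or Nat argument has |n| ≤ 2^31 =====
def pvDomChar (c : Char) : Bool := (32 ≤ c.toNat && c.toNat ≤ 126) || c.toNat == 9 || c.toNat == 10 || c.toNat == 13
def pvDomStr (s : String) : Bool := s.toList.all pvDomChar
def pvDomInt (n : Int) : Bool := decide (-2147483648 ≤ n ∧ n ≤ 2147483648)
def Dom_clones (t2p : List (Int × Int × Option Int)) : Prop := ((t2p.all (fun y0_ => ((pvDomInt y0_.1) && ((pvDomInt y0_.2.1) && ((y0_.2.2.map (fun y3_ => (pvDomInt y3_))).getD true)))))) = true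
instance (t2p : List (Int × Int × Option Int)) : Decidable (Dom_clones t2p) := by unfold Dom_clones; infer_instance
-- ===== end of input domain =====

-- B groups only the tracks of already-counted clone particles (count table + collect pass)
-- instead of A's group-everything-then-filter; an alternative decomposition of the same job.

-- ===== PORT A =====
-- A's dict comprehension `{p:t for p,t in p2t.items() if len(t)>1}` iterates a dict whose keys are
-- distinct, so it is exactly a filter of the items list; `p2t[particle].append(track)` is
-- `modify particle [] (· ++ [track])` — the key is always present at that point, so the default is unused.
def clones (t2p : List (Int × Int × Option Int)) : List (Int × List Int) :=
  let p2t : PySem.Dict Int (List Int) := t2p.foldl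
    (fun d e =>
      match e.2.2 with
      | none => d
      | some particle =>
        let d' := if d.contains particle then d else d.insert particle []
        d'.modify particle [] (fun ts => ts ++ [e.1]))
    PySem.Dict.empty
  p2t.items.filter (fun pt => decide (1 < pt.2.length))

-- ===== PORT B =====
-- `counts[particle]` in the second loop always finds its key (pass 1 counted every non-None
-- particle), so `getD _ 0` is exact there.
def clones_alt (t2p : List (Int × Int × Option Int)) : List (Int × List Int) :=
  let counts : PySem.Dict Int Int := t2p.foldl
    (fun d e =>
      match e.2.2 with
      | none => d
      | some particle => d.insert particle (d.getD particle 0 + 1))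
    PySem.Dict.empty
  let result : PySem.Dict Int (List Int) := t2p.foldl
    (fun d e =>
      match e.2.2 with
      | none => d
      | some particle =>
        if 1 < counts.getD particle 0 then
          (d.setdefault particle []).modify particle [] (fun ts => ts ++ [e.1])
        else d)
    PySem.Dict.empty
  result.items

-- ===== PRECONDITION & SPEC =====
def Spec_clones (t2p : List (Int × Int × Option Int)) (out : List (Int × List Int)) : Prop := out = clones_alt t2p
instance (t2p : List (Int × Int × Option Int)) (out : List (Int × List Int)) : Decidable (Spec_clones t2p out) := by unfold Spec_clones; infer_instance

-- ===== CLAIM (what is proved, stated in full; the proofs are below) =====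
def Claim_equal_clones : Prop := ∀ (t2p : List (Int × Int × Option Int)), Dom_clones t2p → Spec_clones t2p (clones t2p)

-- ===== LEMMAS AND PROOFS =====

-- the (particle, track) pairs of the non-None entries, in iteration order
def pvPairs (t2p : List (Int × Int × Option Int)) : List (Int × Int) :=
  t2p.filterMap (fun e => e.2.2.map (fun p => (p, e.1)))

-- the grouping loop both programs share once their guards are collapsed
def pvGrp (l : List (Int × Int)) : PySem.Dict Int (List Int) :=
  l.foldl (fun d q => d.modify q.1 [] (fun ts => ts ++ [q.2])) PySem.Dict.empty

-- A's "insert [] if absent, then append" is a plain modify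
lemma pv_guard_modify (d : PySem.Dict Int (List Int)) (p : Int) (f : List Int → List Int) :
    (if d.contains p then d else d.insert p []).modify p [] f = d.modify p [] f := by
  by_cases h : d.contains p
  · simp [h]
  · simp only [Bool.not_eq_true] at h
    simp [h, PySem.Dict.modify, PySem.Dict.getD_insert_self, PySem.Dict.insert_insert_self,
      PySem.Dict.getD_of_not_contains d _ h]

-- B's "setdefault [], then append" is the same plain modify
lemma pv_setdefault_modify (d : PySem.Dict Int (List Int)) (p : Int) (f : List Int → List Int) :
    (d.setdefault p []).modify p [] f = d.modify p [] f := by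
  by_cases h : d.contains p
  · rw [PySem.Dict.setdefault_of_contains d _ h]
  · simp only [Bool.not_eq_true] at h
    rw [PySem.Dict.setdefault_of_not_contains d _ h]
    simp [PySem.Dict.modify, PySem.Dict.getD_insert_self, PySem.Dict.insert_insert_self,
      PySem.Dict.getD_of_not_contains d _ h]

-- a loop over t2p that acts only on the non-None entries is a loop over pvPairs
lemma pv_foldl_pairs {γ : Type} (g : γ → Int × Int → γ) :
    ∀ (t2p : List (Int × Int × Option Int)) (init : γ),
      t2p.foldl (fun acc e =>
        match e.2.2 with
        | none => acc
        | some p => g acc (p, e.1)) init = (pvPairs t2p).foldl g init := by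
  intro t2p
  induction t2p with
  | nil => intro init; rfl
  | cons e tl ih =>
    rcases e with ⟨t, x, _ | p⟩ <;> intro init <;>
      simp only [pvPairs, List.filterMap_cons, List.foldl_cons, Option.map_some,
        Option.map_none] at * <;> exact ih _

lemma pv_clones_eq (t2p : List (Int × Int × Option Int)) :
    clones t2p = (pvGrp (pvPairs t2p)).items.filter (fun pt => decide (1 < pt.2.length)) := by
  unfold clones pvGrp
  simp only [pv_guard_modify]
  exact congrArg (fun d : PySem.Dict Int (List Int) =>
    List.filter (fun pt => decide (1 < pt.2.length)) d.items)
    (pv_foldl_pairs (fun d q => d.modify q.1 [] (fun ts => ts ++ [q.2])) t2p PySem.Dict.empty)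

-- B's first loop is Counter over the particles of the non-None entries
lemma pv_counts_eq (t2p : List (Int × Int × Option Int)) :
    t2p.foldl
      (fun (d : PySem.Dict Int Int) e =>
        match e.2.2 with
        | none => d
        | some particle => d.insert particle (d.getD particle 0 + 1))
      PySem.Dict.empty = PySem.Dict.counter ((pvPairs t2p).map Prod.fst) := by
  have h1 := pv_foldl_pairs (fun (d : PySem.Dict Int Int) q => d.insert q.1 (d.getD q.1 0 + 1)) t2p PySem.Dict.empty
  refine h1.trans ?_
  rw [← PySem.Dict.foldl_insert_getD_add_one_eq_counter, List.foldl_map]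

lemma pv_clones_alt_eq (t2p : List (Int × Int × Option Int)) :
    clones_alt t2p =
      (pvGrp ((pvPairs t2p).filter
        (fun q => decide (1 < ((pvPairs t2p).map Prod.fst).count q.1)))).items := by
  unfold clones_alt pvGrp
  simp only [pv_setdefault_modify, pv_counts_eq, PySem.Dict.getD_counter]
  have h1 := pv_foldl_pairs (fun (d : PySem.Dict Int (List Int)) q =>
    if 1 < (((pvPairs t2p).map Prod.fst).count q.1 : Int) then d.modify q.1 [] (fun ts => ts ++ [q.2]) else d)
    t2p PySem.Dict.empty
  refine (congrArg PySem.Dict.items h1).trans ?_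
  rw [List.foldl_filter]
  refine congrArg PySem.Dict.items (List.foldl_ext _ _ _ ?_)
  intro d q _
  by_cases h : 1 < ((pvPairs t2p).map Prod.fst).count q.1
  · simp [h]
  · have h' : ¬ (1 < (((pvPairs t2p).map Prod.fst).count q.1 : Int)) := by exact_mod_cast h
    simp [h, h']

lemma pv_keys_grp (l : List (Int × Int)) :
    (pvGrp l).keys = PySem.Set.ofList (l.map Prod.fst) := by
  unfold pvGrp
  rw [PySem.Dict.keys_foldl_modify_key l Prod.fst [] (fun _ q => (fun ts => ts ++ [q.2]))]
  simp [PySem.Set.update_nil_left]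

lemma pv_nodup_keys_grp (l : List (Int × Int)) : (pvGrp l).keys.Nodup := by
  unfold pvGrp
  exact PySem.Dict.nodup_keys_foldl_modify_key l Prod.fst [] (fun _ q => (fun ts => ts ++ [q.2])) _ (by simp)

lemma pv_getD_grp (l : List (Int × Int)) (c : Int) :
    (pvGrp l).getD c [] = (l.filter (fun q => q.1 == c)).map (fun q => q.2) := by
  unfold pvGrp
  rw [PySem.Dict.getD_foldl_modify_append l PySem.Dict.empty c]
  simp

lemma pv_discard_filter {α : Type} [BEq α] [LawfulBEq α] (s : List α) (c : α → Bool) (x : α) :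
    PySem.Set.discard (s.filter c) x = (PySem.Set.discard s x).filter c := by
  simp only [PySem.Set.discard, List.filter_filter]
  exact List.filter_congr (fun y _ => by rw [Bool.and_comm])

lemma pv_discard_filter_not {α : Type} [BEq α] [LawfulBEq α] (s : List α) (c : α → Bool) (x : α)
    (hx : c x = false) : (PySem.Set.discard s x).filter c = s.filter c := by
  simp only [PySem.Set.discard, List.filter_filter]
  refine List.filter_congr (fun y _ => ?_)
  by_cases hy : c y
  · have : (y == x) = false := by
      by_cases h : y = x
      · subst h; rw [hy] at hx; exact absurd hx (by simp)
      · simp [h]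
    simp [hy, this]
  · simp only [Bool.not_eq_true] at hy; simp [hy]

-- first-occurrence dedup commutes with an element-wise filter
lemma pv_ofList_filter {α : Type} [BEq α] [LawfulBEq α] (c : α → Bool) (xs : List α) :
    PySem.Set.ofList (xs.filter c) = (PySem.Set.ofList xs).filter c := by
  induction xs with
  | nil => rfl
  | cons x xs ih =>
    by_cases hx : c x
    · rw [List.filter_cons_of_pos hx, PySem.Set.ofList_cons, PySem.Set.ofList_cons,
        List.filter_cons_of_pos hx, ih, pv_discard_filter]
    · rw [List.filter_cons_of_neg (by simpa using hx), PySem.Set.ofList_cons,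
        List.filter_cons_of_neg (by simpa using hx), ih,
        pv_discard_filter_not _ _ _ (by simpa using hx)]

-- main list-level identity: filtering the full grouping by list length
-- = grouping only the pairs whose particle occurs more than once
lemma pv_main (l : List (Int × Int)) :
    (pvGrp l).items.filter (fun pt => decide (1 < pt.2.length)) =
      (pvGrp (l.filter (fun q => decide (1 < (l.map Prod.fst).count q.1)))).items := by
  have hcount : ∀ k : Int, ((l.filter (fun q => q.1 == k)).map (fun q => q.2)).length
      = (l.map Prod.fst).count k := by
    intro k
    rw [List.length_map, ← List.countP_eq_length_filter, List.count_eq_countP, List.countP_map]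
    rfl
  rw [PySem.Dict.items_eq_map_keys _ (pv_nodup_keys_grp l) [],
      PySem.Dict.items_eq_map_keys _ (pv_nodup_keys_grp _) [],
      pv_keys_grp, pv_keys_grp, List.filter_map]
  -- keys of the filtered grouping = filtered keys of the full grouping
  have hkeys : PySem.Set.ofList ((l.filter (fun q => decide (1 < (l.map Prod.fst).count q.1))).map Prod.fst)
      = (PySem.Set.ofList (l.map Prod.fst)).filter (fun k => decide (1 < (l.map Prod.fst).count k)) := by
    have hc : (fun q : Int × Int => decide (1 < (l.map Prod.fst).count q.1))
        = ((fun k : Int => decide (1 < (l.map Prod.fst).count k)) ∘ Prod.fst) := rfl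
    rw [hc, ← List.filter_map, pv_ofList_filter]
  rw [hkeys]
  -- the two filters select the same keys
  have hpred : ((fun pt : Int × List Int => decide (1 < pt.2.length)) ∘
      (fun k => (pvGrp l).getD k [] |> Prod.mk k)) = (fun k => decide (1 < (l.map Prod.fst).count k)) := by
    funext k
    simp only [Function.comp, pv_getD_grp, hcount]
  rw [hpred]
  refine List.map_congr_left (fun k hk => ?_)
  have hck : 1 < (l.map Prod.fst).count k := by
    have := List.of_mem_filter hk
    simpa using this
  -- values agree on clone keys
  rw [pv_getD_grp, pv_getD_grp, List.filter_filter]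
  refine congrArg (Prod.mk k) (congrArg (List.map (fun q : Int × Int => q.2)) (List.filter_congr (fun q _ => ?_)).symm)
  by_cases h : q.1 = k
  · subst h; simp [hck]
  · simp [h]

-- ===== VERDICT (by name: the statement is the Claim_ definition above) =====
theorem clones_spec : Claim_equal_clones := by
  intro t2p _
  unfold Spec_clones
  rw [pv_clones_eq, pv_clones_alt_eq, pv_main]
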